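-- pv_equiv track=rewrite | github.com/Maxwowq/Unhideable | scripts/pre.py | locate_assistant_start
-- ===== SOURCE A (Python) =====
-- from typing import List, Tuple
--
-- ASSISTANT_TOKEN = "<|im_start|>assistant\n"
--
-- def locate_assistant_start(
--     full_id_list: List[int],
--     asst_token_ids: List[int],
--     model_name: str
-- ) -> int:
--     """
--     定位 Assistant 区域的起始位置
--
--     Args:
--         full_id_list: 完整的 token ID 列表
--         asst_token_ids: Assistant 标记的 token ID 列表
--         model_name: 模型名称（用于错误提示）
--
--     Returns:
--         Assistant 起始索引
--     """
--     # 从后往前找，确保定位到的是最后一个对话块（即真正的 Assistant 回复区）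
--     for i in range(len(full_id_list) - len(asst_token_ids), -1, -1):
--         if full_id_list[i : i + len(asst_token_ids)] == asst_token_ids:
--             return i + len(asst_token_ids)
--
--     raise ValueError(
--         f"未能自动定位 Assistant 边界，请检查 Tokenizer '{model_name}' "
--         f"的 Chat Template 是否包含 '{ASSISTANT_TOKEN}'"
--     )
-- ===== SOURCE B (Python) =====
-- from typing import List
--
-- ASSISTANT_TOKEN = "<|im_start|>assistant\n"
--
-- MOD = (1 << 61) - 1
-- BASE = 1_000_003
--
-- def locate_assistant_start(
--     full_id_list: List[int],
--     asst_token_ids: List[int],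
--     model_name: str
-- ) -> int:
--     # Rabin-Karp: one rolling-hash pass over the text; a window is compared
--     # element-wise only on a hash hit (and the hit is verified, so the result
--     # is exact); the last verified match is kept.  A instead slice-compares an
--     # m-element window at every position scanning backward.
--     n = len(full_id_list)
--     m = len(asst_token_ids)
--     if m == 0:
--         return n
--     ph = 0
--     for x in asst_token_ids:
--         ph = (ph * BASE + x) % MOD
--     h = 0
--     for x in full_id_list[:m]:
--         h = (h * BASE + x) % MOD
--     pw = pow(BASE, m - 1, MOD)
--     last = -1
--     for i in range(n - m + 1):
--         if h == ph and full_id_list[i:i + m] == asst_token_ids: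
--             last = i
--         if i + m < n:
--             h = ((h - full_id_list[i] * pw) * BASE + full_id_list[i + m]) % MOD
--     if last < 0:
--         raise ValueError(
--             f"未能自动定位 Assistant 边界，请检查 Tokenizer '{model_name}' "
--             f"的 Chat Template 是否包含 '{ASSISTANT_TOKEN}'"
--         )
--     return last + m
-- ===== Notes on version B (the rewrite author's own statement) =====
-- stated objective: alternative
-- what changed: B replaces A's backward window-by-window slice comparison with Rabin-Karp: a polynomial rolling hash is maintained over one forward pass and a window is compared element-by-element only when its hash equals the pattern's hash (each hit is verified, so the result is exact); the last verified match is kept.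
import Mathlib
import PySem

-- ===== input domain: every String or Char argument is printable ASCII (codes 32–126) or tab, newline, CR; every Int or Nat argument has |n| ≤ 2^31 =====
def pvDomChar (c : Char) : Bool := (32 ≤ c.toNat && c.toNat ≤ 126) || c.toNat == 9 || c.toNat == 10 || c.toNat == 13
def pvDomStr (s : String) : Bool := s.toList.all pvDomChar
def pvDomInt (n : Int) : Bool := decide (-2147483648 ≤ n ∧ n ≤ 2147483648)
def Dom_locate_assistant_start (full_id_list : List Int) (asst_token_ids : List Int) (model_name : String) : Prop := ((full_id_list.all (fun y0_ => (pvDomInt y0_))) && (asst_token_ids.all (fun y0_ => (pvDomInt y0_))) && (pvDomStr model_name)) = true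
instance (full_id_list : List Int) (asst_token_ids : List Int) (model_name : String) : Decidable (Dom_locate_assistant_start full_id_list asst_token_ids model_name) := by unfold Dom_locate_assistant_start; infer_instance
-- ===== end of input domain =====

-- B replaces A's backward slice-per-position scan by Rabin-Karp: one forward rolling-hash
-- pass, element-wise comparison only on hash hits (each hit verified, so exact), keeping
-- the last verified match. Both Pythons raise ValueError when the pattern never occurs;
-- Pre_ excludes exactly those inputs.

-- ===== PORT A =====
-- the 'for i in range(len(full)-len(asst), -1, -1)' loop with its early 'return i + len(asst)'
def pvFindA (full_id_list asst_token_ids : List Int) (m : Int) : List Int → Option Int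
  | [] => none
  | i :: rest =>
    if PySem.List.slice full_id_list (some i) (some (i + m)) = asst_token_ids then
      some (i + m)
    else pvFindA full_id_list asst_token_ids m rest

def locate_assistant_start (full_id_list : List Int) (asst_token_ids : List Int) (model_name : String) : Int :=
  match pvFindA full_id_list asst_token_ids (asst_token_ids.length : Int)
      (PySem.List.pyRange ((full_id_list.length : Int) - (asst_token_ids.length : Int)) (-1) (-1)) with
  | some r => r
  | none => -1  -- Python: raise ValueError — excluded by Pre_locate_assistant_start

-- ===== PORT B =====
-- module constants of Source B
def pvMOD : Int := 2305843009213693951   -- (1 << 61) - 1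
def pvBASE : Int := 1000003

def locate_assistant_start_alt (full_id_list : List Int) (asst_token_ids : List Int) (model_name : String) : Int :=
  let n : Int := (full_id_list.length : Int)
  let m : Int := (asst_token_ids.length : Int)
  if m = 0 then n
  else
    -- ph: hash of the pattern; h: hash of the current window (initially full[:m])
    let ph : Int := asst_token_ids.foldl (fun a x => PySem.Int.mod (a * pvBASE + x) pvMOD) 0
    let h0 : Int := (PySem.List.slice full_id_list none (some m)).foldl
        (fun a x => PySem.Int.mod (a * pvBASE + x) pvMOD) 0
    -- pow(BASE, m-1, MOD)
    let st := (PySem.List.pyRange 0 (n - m + 1) 1).foldl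
      (fun (st : Int × Int) i =>
        let last := if st.1 == ph &&
            PySem.List.slice full_id_list (some i) (some (i + m)) == asst_token_ids
          then i else st.2
        let h := if i + m < n then
            PySem.Int.mod ((st.1 - PySem.List.pyGetD full_id_list i 0 *
                PySem.Int.powMod pvBASE (asst_token_ids.length - 1) pvMOD) * pvBASE +
              PySem.List.pyGetD full_id_list (i + m) 0) pvMOD
          else st.1
        (h, last)) (h0, -1)
    if st.2 < 0 then -1 else st.2 + m

-- ===== PRECONDITION & SPEC =====
-- Pre_ = the pattern occurs somewhere (always true for the empty pattern); on its
-- complement the Python A (and B alike) raise ValueError, so nothing is claimed there.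
def Pre_locate_assistant_start (full_id_list : List Int) (asst_token_ids : List Int) (model_name : String) : Prop :=
  ∃ i : Fin (full_id_list.length + 1),
    (full_id_list.drop (i : Nat)).take asst_token_ids.length = asst_token_ids

instance (full_id_list : List Int) (asst_token_ids : List Int) (model_name : String) : Decidable (Pre_locate_assistant_start full_id_list asst_token_ids model_name) := by
  unfold Pre_locate_assistant_start; infer_instance

def pvWitness_locate_assistant_start : List Int × List Int × String := ([1, 2, 3], [2, 3], "m")

def Spec_locate_assistant_start (full_id_list : List Int) (asst_token_ids : List Int) (model_name : String) (out : Int) : Prop := out = locate_assistant_start_alt full_id_list asst_token_ids model_name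
instance (full_id_list : List Int) (asst_token_ids : List Int) (model_name : String) (out : Int) : Decidable (Spec_locate_assistant_start full_id_list asst_token_ids model_name out) := by unfold Spec_locate_assistant_start; infer_instance

-- ===== CLAIM (what is proved, stated in full; the proofs are below) =====
def Claim_equal_locate_assistant_start : Prop := ∀ (full_id_list : List Int) (asst_token_ids : List Int) (model_name : String), Dom_locate_assistant_start full_id_list asst_token_ids model_name → Pre_locate_assistant_start full_id_list asst_token_ids model_name → Spec_locate_assistant_start full_id_list asst_token_ids model_name (locate_assistant_start full_id_list asst_token_ids model_name)

-- ===== LEMMAS AND PROOFS =====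

-- A's window-match test as a named predicate (proof-only)
def pvQ (full asst : List Int) (i : Int) : Bool :=
  PySem.List.slice full (some i) (some (i + (asst.length : Int))) == asst

-- the window of length m starting at i, and the two hash polynomials (proof-only)
def pvW (full : List Int) (m i : Nat) : List Int := (full.drop i).take m

def pvH (l : List Int) : Int :=
  l.foldl (fun a x => PySem.Int.mod (a * pvBASE + x) pvMOD) 0

def pvPoly (l : List Int) : Int := l.foldl (fun a x => a * pvBASE + x) 0

lemma pvMOD_pos : (0 : Int) < pvMOD := by norm_num [pvMOD]

lemma pvmod_eq (a : Int) : PySem.Int.mod a pvMOD = a % pvMOD :=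
  PySem.Int.mod_eq_emod_of_pos pvMOD_pos

-- folding the mod-step from a reduced accumulator = the pure polynomial, reduced once
lemma pvFoldl_mod (l : List Int) (a : Int) :
    l.foldl (fun a x => PySem.Int.mod (a * pvBASE + x) pvMOD) (a % pvMOD)
      = (l.foldl (fun a x => a * pvBASE + x) a) % pvMOD := by
  induction l generalizing a with
  | nil => rfl
  | cons x t ih =>
    simp only [List.foldl_cons]
    have e1 : Int.ModEq pvMOD (a % pvMOD) a := Int.emod_emod_of_dvd a dvd_rfl
    have h : PySem.Int.mod (a % pvMOD * pvBASE + x) pvMOD = (a * pvBASE + x) % pvMOD := by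
      rw [pvmod_eq]
      exact (e1.mul_right pvBASE).add_right x
    rw [h, ih (a * pvBASE + x)]

lemma pvH_eq (l : List Int) : pvH l = pvPoly l % pvMOD := by
  have h := pvFoldl_mod l 0
  rw [Int.zero_emod] at h
  exact h

-- leading-coefficient form of the Horner fold
lemma pvPoly_from (l : List Int) (a : Int) :
    l.foldl (fun a x => a * pvBASE + x) a = a * pvBASE ^ l.length + pvPoly l := by
  induction l generalizing a with
  | nil => simp [pvPoly]
  | cons x t ih =>
    simp only [List.foldl_cons, List.length_cons]
    have hx : pvPoly (x :: t) = x * pvBASE ^ t.length + pvPoly t := by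
      unfold pvPoly
      simp only [List.foldl_cons, zero_mul, zero_add]
      exact ih x
    rw [ih (a * pvBASE + x), hx]
    ring

lemma pvPoly_cons (a : Int) (l : List Int) :
    pvPoly (a :: l) = a * pvBASE ^ l.length + pvPoly l := by
  unfold pvPoly
  simp only [List.foldl_cons, zero_mul, zero_add]
  exact pvPoly_from l a

lemma pvPoly_concat (l : List Int) (x : Int) :
    pvPoly (l ++ [x]) = pvPoly l * pvBASE + x := by
  unfold pvPoly
  rw [List.foldl_append]
  rfl

-- the rolling update really is the hash of the next window
lemma pvRoll (full asst : List Int) (j : Nat) (hm : asst ≠ [])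
    (hlt : j + asst.length < full.length) :
    PySem.Int.mod ((pvH (pvW full asst.length j) -
        PySem.List.pyGetD full (j : Int) 0 *
          PySem.Int.powMod pvBASE (asst.length - 1) pvMOD) * pvBASE +
      PySem.List.pyGetD full ((j : Int) + (asst.length : Int)) 0) pvMOD
    = pvH (pvW full asst.length (j + 1)) := by
  have hm1 : 1 ≤ asst.length := List.length_pos_iff.mpr hm
  have hj : j < full.length := by omega
  have hjm : j + asst.length < full.length := hlt
  -- the two element accesses
  have hc : PySem.List.pyGetD full (j : Int) 0 = full[j] := by
    rw [PySem.List.pyGetD_natCast, List.getD_eq_getElem full 0 hj]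
  have hx : PySem.List.pyGetD full ((j : Int) + (asst.length : Int)) 0
      = full[j + asst.length] := by
    rw [show ((j : Int) + (asst.length : Int)) = ((j + asst.length : Nat) : Int) by push_cast; ring,
      PySem.List.pyGetD_natCast, List.getD_eq_getElem full 0 hjm]
  -- window decompositions
  set T : List Int := (full.drop (j + 1)).take (asst.length - 1) with hT
  have hW1 : pvW full asst.length j = full[j] :: T := by
    unfold pvW
    rw [List.drop_eq_getElem_cons hj]
    conv_lhs => rw [show asst.length = (asst.length - 1) + 1 by omega, List.take_succ_cons]
  have hTl : T.length = asst.length - 1 := by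
    rw [hT, List.length_take, List.length_drop]; omega
  have hW2 : pvW full asst.length (j + 1) = T ++ [full[j + asst.length]] := by
    unfold pvW
    conv_lhs => rw [show asst.length = (asst.length - 1) + 1 by omega, List.take_add_one]
    congr 1
    rw [List.getElem?_drop,
      show j + 1 + (asst.length - 1) = j + asst.length by omega,
      List.getElem?_eq_getElem hjm]
    rfl
  -- reduce to polynomial arithmetic mod pvMOD
  rw [hc, hx, pvmod_eq, PySem.Int.powMod_eq, pvmod_eq, pvH_eq, pvH_eq, hW1, hW2,
    pvPoly_concat, pvPoly_cons, hTl]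
  have e1 : Int.ModEq pvMOD
      ((full[j] * pvBASE ^ (asst.length - 1) + pvPoly T) % pvMOD)
      (full[j] * pvBASE ^ (asst.length - 1) + pvPoly T) :=
    Int.emod_emod_of_dvd _ dvd_rfl
  have e2 : Int.ModEq pvMOD (pvBASE ^ (asst.length - 1) % pvMOD)
      (pvBASE ^ (asst.length - 1)) :=
    Int.emod_emod_of_dvd _ dvd_rfl
  have e3 := ((e1.sub (e2.mul_left full[j])).mul_right pvBASE).add_right
    full[j + asst.length]
  have e4 : (((full[j] * pvBASE ^ (asst.length - 1) + pvPoly T) % pvMOD -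
          full[j] * (pvBASE ^ (asst.length - 1) % pvMOD)) * pvBASE +
        full[j + asst.length]) % pvMOD
      = ((full[j] * pvBASE ^ (asst.length - 1) + pvPoly T -
          full[j] * pvBASE ^ (asst.length - 1)) * pvBASE +
        full[j + asst.length]) % pvMOD := e3
  rw [e4]
  congr 1
  ring

-- B's match condition collapses to A's window test (a verified hash hit IS a match)
lemma pvCond (full asst : List Int) (j : Nat) :
    ((pvH (pvW full asst.length j) == pvH asst) &&
      (PySem.List.slice full (some (j : Int))
          (some ((j : Int) + (asst.length : Int))) == asst))
    = pvQ full asst (j : Int) := by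
  unfold pvQ
  by_cases hs : PySem.List.slice full (some (j : Int))
      (some ((j : Int) + (asst.length : Int))) = asst
  · have hW : pvW full asst.length j = asst := by
      unfold pvW
      rw [← PySem.List.slice_natCast_add]; exact hs
    simp [hs, hW]
  · simp [hs]

-- B's rolling-hash fold computes exactly the plain last-match fold of pvQ
lemma pvLoop (full asst : List Int) (hm : asst ≠ []) (t j : Nat)
    (hjt : j + t + asst.length = full.length + 1) (acc : Int) :
    (((List.range' j t).map (fun k : Nat => (k : Int))).foldl
      (fun (st : Int × Int) i =>
        let last := if st.1 == pvH asst &&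
            PySem.List.slice full (some i) (some (i + (asst.length : Int))) == asst
          then i else st.2
        let h := if i + (asst.length : Int) < (full.length : Int) then
            PySem.Int.mod ((st.1 - PySem.List.pyGetD full i 0 *
                PySem.Int.powMod pvBASE (asst.length - 1) pvMOD) * pvBASE +
              PySem.List.pyGetD full (i + (asst.length : Int)) 0) pvMOD
          else st.1
        (h, last))
      (pvH (pvW full asst.length j), acc)).2
    = ((List.range' j t).map (fun k : Nat => (k : Int))).foldl
        (fun a i => if pvQ full asst i then i else a) acc := by
  induction t generalizing j acc with
  | zero => rfl
  | succ t ih =>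
    rw [List.range'_succ]
    simp only [List.map_cons, List.foldl_cons]
    rw [pvCond full asst j]
    cases t with
    | zero =>
      simp only [List.range'_zero, List.map_nil, List.foldl_nil]
    | succ t' =>
      have hlt : j + asst.length < full.length := by omega
      have hif : ((j : Int) + (asst.length : Int) < (full.length : Int)) := by
        omega
      rw [if_pos hif, pvRoll full asst j hm hlt,
        ih (j + 1) (by omega) (if pvQ full asst (j : Int) = true then (j : Int) else acc)]

-- A's loop is find-first over its index list, shifted by m.
lemma pvFindA_eq_find? (full asst : List Int) (l : List Int) :
    pvFindA full asst (asst.length : Int) l =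
      (l.find? (pvQ full asst)).map (· + (asst.length : Int)) := by
  induction l with
  | nil => rfl
  | cons i rest ih =>
    by_cases h : PySem.List.slice full (some i) (some (i + (asst.length : Int))) = asst
    · simp [pvFindA, pvQ, h]
    · simp [pvFindA, pvQ, h, ih]

-- a last-match fold over l is find-first over l.reverse.
lemma pvFoldlLast_eq (p : Int → Bool) (l : List Int) (acc : Int) :
    l.foldl (fun a i => if p i then i else a) acc = (l.reverse.find? p).getD acc := by
  induction l generalizing acc with
  | nil => rfl
  | cons i rest ih =>
    simp only [List.foldl_cons, List.reverse_cons, List.find?_append, ih]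
    cases h : rest.reverse.find? p with
    | some x => simp
    | none =>
      by_cases hp : p i <;> simp [hp]

-- ===== VERDICT (by name: the statement is the Claim_ definition above) =====
theorem locate_assistant_start_spec : Claim_equal_locate_assistant_start := by
  intro full asst model _hDom hPre
  unfold Spec_locate_assistant_start
  obtain ⟨i₀, hi₀⟩ := hPre
  have hlen : (i₀ : Nat) + asst.length ≤ full.length := by
    have hL := congrArg List.length hi₀
    simp [List.length_take, List.length_drop] at hL
    omega
  by_cases hm : asst = []
  · -- empty pattern: A matches immediately at i = len(full); B returns n directly
    subst hm
    simp only [locate_assistant_start, locate_assistant_start_alt, List.length_nil,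
      Nat.cast_zero, sub_zero]
    rw [PySem.List.pyRange_neg_one_cons (by omega : (-1 : Int) < (full.length : Int))]
    have hslice : PySem.List.slice full (some (full.length : Int))
        (some (full.length : Int)) = ([] : List Int) := by
      rw [PySem.List.slice_natCast]
      simp
    simp [pvFindA, hslice]
  · -- nonempty pattern
    have hm0 : 0 < asst.length := List.length_pos_iff.mpr hm
    have hmn : asst.length ≤ full.length := by omega
    set K : Nat := full.length - asst.length + 1 with hK
    have hcastK : (full.length : Int) - (asst.length : Int) + 1 = (K : Int) := by
      rw [hK]; push_cast [hmn]; ring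
    set L : List Int :=
      PySem.List.pyRange 0 ((full.length : Int) - (asst.length : Int) + 1) 1 with hL
    have hLmap : L = (List.range' 0 K).map (fun k : Nat => (k : Int)) := by
      rw [hL, hcastK, PySem.List.pyRange_zero_nat, List.range_eq_range']
    have hrev : PySem.List.pyRange ((full.length : Int) - (asst.length : Int)) (-1) (-1)
        = L.reverse := by
      rw [hL]
      have h := PySem.List.pyRange_neg_one_eq_reverse
        ((full.length : Int) - (asst.length : Int)) (-1)
      simpa using h
    -- Pre gives a match inside the range
    have hQi₀ : pvQ full asst ((i₀ : Nat) : Int) = true := by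
      unfold pvQ
      rw [PySem.List.slice_natCast_add]
      exact beq_iff_eq.mpr hi₀
    have hi₀mem : (((i₀ : Nat) : Nat) : Int) ∈ L.reverse := by
      rw [List.mem_reverse, hL, PySem.List.mem_pyRange_one]
      constructor
      · exact Int.natCast_nonneg _
      · omega
    obtain ⟨r, hr⟩ : ∃ r, L.reverse.find? (pvQ full asst) = some r := by
      cases hfind : L.reverse.find? (pvQ full asst) with
      | some r => exact ⟨r, rfl⟩
      | none =>
        exact absurd hQi₀ (by simpa using List.find?_eq_none.mp hfind _ hi₀mem)
    have hrmem : r ∈ L.reverse := List.mem_of_find?_eq_some hr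
    have hr0 : 0 ≤ r := by
      rw [List.mem_reverse, hL, PySem.List.mem_pyRange_one] at hrmem
      exact hrmem.1
    -- evaluate A
    have hA : locate_assistant_start full asst model = r + (asst.length : Int) := by
      unfold locate_assistant_start
      rw [hrev, pvFindA_eq_find?, hr]
      rfl
    -- evaluate B
    have hB : locate_assistant_start_alt full asst model = r + (asst.length : Int) := by
      unfold locate_assistant_start_alt
      simp only
      rw [if_neg (by omega : ¬((asst.length : Int) = 0))]
      have hph : asst.foldl (fun a x => PySem.Int.mod (a * pvBASE + x) pvMOD) 0
          = pvH asst := rfl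
      have hh0 : (PySem.List.slice full none (some (asst.length : Int))).foldl
          (fun a x => PySem.Int.mod (a * pvBASE + x) pvMOD) 0
          = pvH (pvW full asst.length 0) := by
        rw [PySem.List.slice_to_natCast]
        rfl
      rw [hph, hh0, ← hL, hLmap,
        pvLoop full asst hm K 0 (by omega) (-1),
        pvFoldlLast_eq, ← hLmap, hr]
      simp only [Option.getD_some]
      rw [if_neg (by omega : ¬(r < 0))]
    rw [hA, hB]
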